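-- pv_equiv track=rewrite | github.com/eunseo-kim/Algorithm | BOJ/삼성 SW 역량 테스트 기출 문제/주사위 굴리기 2.py | solution
-- ===== SOURCE A (Python) =====
-- from collections import deque
--
-- def in_range(r, c, R, C):
--     if 0 <= r < R and 0 <= c < C:
--         return True
--     return False
--
-- def solution(ROW, COL, K, board):
--     total_score = 0
--
--     dice_row = deque([1, 5, 6, 2])
--     dice_col = deque([1, 3, 6, 4])
--
--     moves = [[0, 1], [1, 0], [0, -1], [-1, 0]]  # 시계방향 / 동서남북
--     move_type = {"01": "RIGHT", "10": "BOTTOM", "0-1": "LEFT", "-10": "TOP"}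
--     cur_move_idx = 0  # 시작은 동쪽
--
--     row, col = 0, 0
--     for _ in range(K):
--         # [1] 현재 방향대로 주사위 이동
--         mr, mc = moves[cur_move_idx]
--         m_type = move_type[f"{mr}{mc}"]
--
--         if m_type == "RIGHT":
--             top = dice_col.pop()
--             dice_col.appendleft(top)
--             dice_row[0] = dice_col[0]
--             dice_row[2] = dice_col[2]
--         elif m_type == "LEFT":
--             top = dice_col.popleft()
--             dice_col.append(top)
--             dice_row[0] = dice_col[0]
--             dice_row[2] = dice_col[2]
--         elif m_type == "TOP":
--             top = dice_row.popleft()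
--             dice_row.append(top)
--             dice_col[0] = dice_row[0]
--             dice_col[2] = dice_row[2]
--         else:
--             top = dice_row.pop()
--             dice_row.appendleft(top)
--             dice_col[0] = dice_row[0]
--             dice_col[2] = dice_row[2]
--
--         # [2] 주사위 바닥에 있는 숫자 구하기
--         A = dice_row[2]
--
--         # [3] BFS로 점수 구하기
--         nr, nc = row + mr, col + mc  # 현재 위치 [nr, nc]
--         B = board[nr][nc]
--
--         def BFS(row, col):
--             C = 0
--             visited = [[False for _ in range(COL)] for _ in range(ROW)]
--             queue = deque()
--             queue.append([row, col])
--             target = board[row][col]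
--             while queue:
--                 row, col = queue.popleft()
--                 if visited[row][col]:
--                     continue
--                 visited[row][col] = True
--                 C += 1
--
--                 for mr, mc in moves:
--                     nr = row + mr
--                     nc = col + mc
--                     if in_range(nr, nc, ROW, COL) and not visited[nr][nc] and board[nr][nc] == target:
--                         queue.append([nr, nc])
--             return C
--
--         C = BFS(nr, nc)
--         score = B * C
--         total_score += score
--
--         # [3] 다음 방향 구하기(만약 이동가능하지 않다면 반대방향)
--         if A < B:  # 시계 방향
--             cur_move_idx -= 1
--         elif A > B:  # 반시계 방향
--             cur_move_idx += 1
--         cur_move_idx = (cur_move_idx + 4) % 4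
--
--         # [4] 이동가능한지 탐색
--         row, col = nr, nc
--         mr, mc = moves[cur_move_idx]
--         next_r, next_c = row + mr, col + mc
--         if not in_range(next_r, next_c, ROW, COL):
--             cur_move_idx += 2
--             cur_move_idx = (cur_move_idx + 4) % 4
--
--         mr, mc = moves[cur_move_idx]
--
--     return total_score
-- ===== SOURCE B (Python) =====
-- def solution(ROW, COL, K, board):
--     moves = [(0, 1), (1, 0), (0, -1), (-1, 0)]  # E, S, W, N (clockwise)
--
--     # Precompute every cell's connected-component size once (one flood fill
--     # per component over the whole grid), then O(1) dict lookup per step.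
--     sizes = {}
--     for r in range(ROW):
--         for c in range(COL):
--             if (r, c) in sizes:
--                 continue
--             target = board[r][c]
--             comp = []
--             seen = {(r, c)}
--             stack = [(r, c)]
--             while stack:
--                 cr, cc = stack.pop()
--                 comp.append((cr, cc))
--                 for dr, dc in moves:
--                     nr, nc = cr + dr, cc + dc
--                     if 0 <= nr < ROW and 0 <= nc < COL and (nr, nc) not in seen \
--                             and board[nr][nc] == target:
--                         seen.add((nr, nc))
--                         stack.append((nr, nc))
--             n = len(comp)
--             for cell in comp:
--                 sizes[cell] = n
--
--     # dice as six named faces instead of two cross-synced deques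
--     top, bot, north, south, east, west = 1, 6, 2, 5, 3, 4
--     row, col, d = 0, 0, 0
--     total = 0
--     for _ in range(K):
--         mr, mc = moves[d]
--         if d == 0:    # roll east
--             top, bot, east, west = west, east, top, bot
--         elif d == 2:  # roll west
--             top, bot, east, west = east, west, bot, top
--         elif d == 3:  # roll north
--             top, south, bot, north = south, bot, north, top
--         else:         # roll south
--             top, south, bot, north = north, top, south, bot
--         row, col = row + mr, col + mc
--
--         cell = board[row][col]
--         total += cell * sizes[(row, col)]
--
--         if bot < cell:
--             d = (d - 1) % 4
--         elif bot > cell: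
--             d = (d + 1) % 4
--         nr, nc = row + moves[d][0], col + moves[d][1]
--         if not (0 <= nr < ROW and 0 <= nc < COL):
--             d = (d + 2) % 4
--     return total
-- ===== Notes on version B (the rewrite author's own statement) =====
-- stated objective: alternative
-- what changed: B precomputes every cell's connected-component size in one pass over the grid (one stack-based flood fill per component) and does a dict lookup per step, instead of A's fresh whole-grid BFS every step; it also replaces the two cross-synced deques by six named dice faces with direct roll formulas. (Asymptotically lighter per step, but a timing run's large inputs are ragged boards outside Pre_, so no speed is claimed.)
-- outside the precondition, e.g. on solution(1, 2, 4, [[6, 2]]): A returns 12, B raises KeyError; on solution(1, 2, 1, [[1, 4]]): A returns 4, B returns 4; on solution(5, 5, 0, []): A returns 0, B raises IndexError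
import Mathlib
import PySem

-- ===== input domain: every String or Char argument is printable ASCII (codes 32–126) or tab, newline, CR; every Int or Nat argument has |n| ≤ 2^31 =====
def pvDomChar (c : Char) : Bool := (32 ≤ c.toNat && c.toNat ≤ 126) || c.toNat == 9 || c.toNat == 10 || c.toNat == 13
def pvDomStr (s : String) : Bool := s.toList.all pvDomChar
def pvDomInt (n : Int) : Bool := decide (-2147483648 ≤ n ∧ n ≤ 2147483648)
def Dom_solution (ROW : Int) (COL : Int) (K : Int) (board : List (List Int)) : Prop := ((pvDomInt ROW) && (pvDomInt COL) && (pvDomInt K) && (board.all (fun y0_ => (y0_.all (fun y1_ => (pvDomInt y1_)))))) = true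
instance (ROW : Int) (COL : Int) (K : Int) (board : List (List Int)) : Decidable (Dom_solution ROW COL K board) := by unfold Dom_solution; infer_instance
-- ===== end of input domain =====

-- B precomputes all connected-component sizes once up front (one flood fill per component,
-- then one dict lookup per step) and replaces the two cross-synced deques by six named dice faces.

-- shared small helpers (identical sub-expressions of both Pythons)
def pvInRange (r c R C : Int) : Bool := decide (0 ≤ r ∧ r < R ∧ 0 ≤ c ∧ c < C)

-- board[r][c]; the .getD defaults are never reached under Pre_ (indices are in range there)
def pvBAt (board : List (List Int)) (r c : Int) : Int :=
  (PySem.List.pyGet? ((PySem.List.pyGet? board r).getD []) c).getD 0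

def pvMoves : List (Int × Int) := [(0, 1), (1, 0), (0, -1), (-1, 0)]

-- ===== PORT A =====

-- visited[r][c]; exact for the in-range nonnegative indices that are the only ones reached under Pre_
def pvVGet (v : List (List Bool)) (r c : Int) : Bool :=
  (PySem.List.pyGet? ((PySem.List.pyGet? v r).getD []) c).getD false

-- visited[r][c] = True; exact for in-range nonnegative indices (the only ones reached under Pre_)
def pvVSet (v : List (List Bool)) (r c : Int) : List (List Bool) :=
  v.set r.toNat ((v.getD r.toNat []).set c.toNat true)

-- the `while queue:` loop of A's BFS; fuel is a totality guard only, never exhausted under Pre_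
def pvBFSLoop (ROW COL : Int) (board : List (List Int)) (target : Int) :
    Nat → List (Int × Int) → List (List Bool) → Int → Int
  | 0, _, _, cnt => cnt
  | _ + 1, [], _, cnt => cnt
  | fuel + 1, (r, c) :: rest, v, cnt =>
    if pvVGet v r c then
      pvBFSLoop ROW COL board target fuel rest v cnt
    else
      let v' := pvVSet v r c
      let nbrs := pvMoves.filterMap (fun m =>
        let nr := r + m.1
        let nc := c + m.2
        if pvInRange nr nc ROW COL && !(pvVGet v' nr nc) && (pvBAt board nr nc == target)
        then some (nr, nc) else none)
      pvBFSLoop ROW COL board target fuel (rest ++ nbrs) v' (cnt + 1)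

-- A's BFS(row, col)
def pvBFS (ROW COL : Int) (board : List (List Int)) (r c : Int) : Int :=
  let visited := List.replicate ROW.toNat (List.replicate COL.toNat false)
  let target := pvBAt board r c
  pvBFSLoop ROW COL board target (1 + 4 * (ROW.toNat * COL.toNat)) [(r, c)] visited 0

def pvMoveType : PySem.Dict String String :=
  PySem.Dict.ofList [("01", "RIGHT"), ("10", "BOTTOM"), ("0-1", "LEFT"), ("-10", "TOP")]

-- the four-way branch on move_type inside A's loop body
def pvRollA (mtype : String) (dr dc : List Int) : List Int × List Int :=
  if mtype == "RIGHT" then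
    let t := (PySem.List.pyGet? dc (-1)).getD 0
    let dc1 := t :: dc.take (dc.length - 1)
    (((dr.set 0 ((PySem.List.pyGet? dc1 0).getD 0)).set 2 ((PySem.List.pyGet? dc1 2).getD 0)), dc1)
  else if mtype == "LEFT" then
    let t := (PySem.List.pyGet? dc 0).getD 0
    let dc1 := dc.drop 1 ++ [t]
    (((dr.set 0 ((PySem.List.pyGet? dc1 0).getD 0)).set 2 ((PySem.List.pyGet? dc1 2).getD 0)), dc1)
  else if mtype == "TOP" then
    let t := (PySem.List.pyGet? dr 0).getD 0
    let dr1 := dr.drop 1 ++ [t]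
    (dr1, ((dc.set 0 ((PySem.List.pyGet? dr1 0).getD 0)).set 2 ((PySem.List.pyGet? dr1 2).getD 0)))
  else
    let t := (PySem.List.pyGet? dr (-1)).getD 0
    let dr1 := t :: dr.take (dr.length - 1)
    (dr1, ((dc.set 0 ((PySem.List.pyGet? dr1 0).getD 0)).set 2 ((PySem.List.pyGet? dr1 2).getD 0)))

-- A's `for _ in range(K)` loop; dr/dc are the deques dice_row/dice_col (always length 4)
def pvALoop (ROW COL : Int) (board : List (List Int)) :
    Nat → Int → Int → Int → List Int → List Int → Int → Int
  | 0, _, _, _, _, _, total => total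
  | k + 1, row, col, idx, dr, dc, total =>
    let m := (PySem.List.pyGet? pvMoves idx).getD (0, 0)
    let mtype := (PySem.Dict.get? pvMoveType (PySem.Int.toStr m.1 ++ PySem.Int.toStr m.2)).getD ""
    let p := pvRollA mtype dr dc
    let dr' := p.1
    let dc' := p.2
    let A := (PySem.List.pyGet? dr' 2).getD 0
    let nr := row + m.1
    let nc := col + m.2
    let B := pvBAt board nr nc
    let C := pvBFS ROW COL board nr nc
    let total' := total + B * C
    let idx1 := if A < B then idx - 1 else if A > B then idx + 1 else idx
    let idx2 := PySem.Int.mod (idx1 + 4) 4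
    let m2 := (PySem.List.pyGet? pvMoves idx2).getD (0, 0)
    let idx3 := if !(pvInRange (nr + m2.1) (nc + m2.2) ROW COL)
                then PySem.Int.mod (idx2 + 2 + 4) 4 else idx2
    pvALoop ROW COL board k nr nc idx3 dr' dc' total'

def solution (ROW : Int) (COL : Int) (K : Int) (board : List (List Int)) : Int :=
  pvALoop ROW COL board K.toNat 0 0 0 [1, 5, 6, 2] [1, 3, 6, 4] 0

-- ===== PORT B =====

-- the `while stack:` loop of B's flood fill; fuel is a totality guard only, never exhausted under Pre_
def pvDFSLoop (ROW COL : Int) (board : List (List Int)) (target : Int) :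
    Nat → List (Int × Int) → PySem.Set (Int × Int) → List (Int × Int) → List (Int × Int)
  | 0, _, _, comp => comp
  | _ + 1, [], _, comp => comp
  | fuel + 1, st@(_ :: _), seen, comp =>
    let x := (PySem.List.pyGet? st (-1)).getD (0, 0)       -- stack.pop()
    let rest := st.take (st.length - 1)
    let comp' := comp ++ [x]
    let q := pvMoves.foldl (fun (s : PySem.Set (Int × Int) × List (Int × Int)) m =>
      let nr := x.1 + m.1
      let nc := x.2 + m.2
      if pvInRange nr nc ROW COL && !(PySem.Set.contains s.1 (nr, nc))
          && (pvBAt board nr nc == target)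
      then (PySem.Set.add s.1 (nr, nc), s.2 ++ [(nr, nc)])
      else s) (seen, rest)
    pvDFSLoop ROW COL board target fuel q.2 q.1 comp'

-- B's flood fill: the list of cells of the component of (r, c), each exactly once
def pvComponent (ROW COL : Int) (board : List (List Int)) (r c : Int) : List (Int × Int) :=
  pvDFSLoop ROW COL board (pvBAt board r c) (ROW.toNat * COL.toNat)
    [(r, c)] (PySem.Set.ofList [(r, c)]) []

-- the body under `if (r, c) in sizes: continue`: flood fill and assign the size to every member
def pvInsertComp (ROW COL : Int) (board : List (List Int))
    (d : PySem.Dict (Int × Int) Int) (r c : Int) : PySem.Dict (Int × Int) Int :=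
  let comp := pvComponent ROW COL board r c
  comp.foldl (fun d cell => PySem.Dict.insert d cell (comp.length : Int)) d

-- B's precompute pass: `for r in range(ROW): for c in range(COL): …`
def pvSizes (ROW COL : Int) (board : List (List Int)) : PySem.Dict (Int × Int) Int :=
  (PySem.List.pyRange 0 ROW 1).foldl (fun d r =>
    (PySem.List.pyRange 0 COL 1).foldl (fun d c =>
      if PySem.Dict.contains d (r, c) then d
      else pvInsertComp ROW COL board d r c) d) PySem.Dict.empty

-- B's `for _ in range(K)` loop; the dice is six named faces; sizes[(row, col)] is ported as
-- Dict.getD (the key is always present under Pre_, where the dice never leaves the grid)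
def pvBLoop (ROW COL : Int) (board : List (List Int)) (sizes : PySem.Dict (Int × Int) Int) :
    Nat → Int → Int → Int → Int → Int → Int → Int → Int → Int → Int → Int
  | 0, _, _, _, _, _, _, _, _, _, total => total
  | k + 1, top, bot, north, south, east, west, row, col, d, total =>
    let m := (PySem.List.pyGet? pvMoves d).getD (0, 0)
    let f :=
      if d == 0 then (west, east, north, south, top, bot)        -- roll east
      else if d == 2 then (east, west, north, south, bot, top)   -- roll west
      else if d == 3 then (south, north, top, bot, east, west)    -- roll north
      else (north, south, bot, top, east, west)                   -- roll south
    let row' := row + m.1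
    let col' := col + m.2
    let cell := pvBAt board row' col'
    let sz := PySem.Dict.getD sizes (row', col') 0
    let total' := total + cell * sz
    let d1 := if f.2.1 < cell then PySem.Int.mod (d - 1) 4
              else if f.2.1 > cell then PySem.Int.mod (d + 1) 4 else d
    let m2 := (PySem.List.pyGet? pvMoves d1).getD (0, 0)
    let d2 := if !(pvInRange (row' + m2.1) (col' + m2.2) ROW COL)
              then PySem.Int.mod (d1 + 2) 4 else d1
    pvBLoop ROW COL board sizes k f.1 f.2.1 f.2.2.1 f.2.2.2.1 f.2.2.2.2.1 f.2.2.2.2.2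
      row' col' d2 total'

def solution_alt (ROW : Int) (COL : Int) (K : Int) (board : List (List Int)) : Int :=
  pvBLoop ROW COL board (pvSizes ROW COL board) K.toNat 1 6 2 5 3 4 0 0 0 0

-- ===== PRECONDITION & SPEC =====
-- Pre_ excludes boards not covering a (positive) ROW×COL grid — there both programs raise
-- IndexError (A as soon as the walk reaches a missing cell, for K ≥ 1; B already in its
-- precompute pass, for any K) — and, for K ≥ 1, single-row/single-column grids (ROW = 1 or
-- COL = 1): there A's bounce rule can push the dice off the board, after which A raises
-- IndexError or returns a negative-index-wrap value depending on the whole walk (no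
-- closed-form input condition separates the two), while B raises KeyError on any off-board
-- step because the precomputed size dict has only in-grid keys.
def Pre_solution (ROW : Int) (COL : Int) (K : Int) (board : List (List Int)) : Prop :=
  (ROW ≤ 0 ∨ COL ≤ 0 ∨ (ROW ≤ (board.length : Int) ∧
    ∀ rw ∈ board.take ROW.toNat, COL ≤ (rw.length : Int))) ∧
  (K ≤ 0 ∨ (2 ≤ ROW ∧ 2 ≤ COL))
instance (ROW : Int) (COL : Int) (K : Int) (board : List (List Int)) : Decidable (Pre_solution ROW COL K board) := by unfold Pre_solution; infer_instance

def pvWitness_solution : Int × Int × Int × List (List Int) := (2, 2, 3, [[1, 2], [2, 2]])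

def Spec_solution (ROW : Int) (COL : Int) (K : Int) (board : List (List Int)) (out : Int) : Prop := out = solution_alt ROW COL K board
instance (ROW : Int) (COL : Int) (K : Int) (board : List (List Int)) (out : Int) : Decidable (Spec_solution ROW COL K board out) := by unfold Spec_solution; infer_instance

-- ===== CLAIM (what is proved, stated in full; the proofs are below) =====
def Claim_equal_solution : Prop := ∀ (ROW : Int) (COL : Int) (K : Int) (board : List (List Int)), Dom_solution ROW COL K board → Pre_solution ROW COL K board → Spec_solution ROW COL K board (solution ROW COL K board)

-- ===== LEMMAS AND PROOFS =====

-- ---------- the component relation and its reachable sets ----------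

def pvGood (ROW COL : Int) (board : List (List Int)) (t : Int) (x : Int × Int) : Prop :=
  0 ≤ x.1 ∧ x.1 < ROW ∧ 0 ≤ x.2 ∧ x.2 < COL ∧ pvBAt board x.1 x.2 = t

def pvStepR (ROW COL : Int) (board : List (List Int)) (t : Int) (x y : Int × Int) : Prop :=
  pvGood ROW COL board t x ∧ pvGood ROW COL board t y ∧
    ∃ m ∈ pvMoves, y = (x.1 + m.1, x.2 + m.2)

def pvReach (ROW COL : Int) (board : List (List Int)) (t : Int) (s : Int × Int) :
    Set (Int × Int) :=
  {x | Relation.ReflTransGen (pvStepR ROW COL board t) s x}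

noncomputable def pvGrid (ROW COL : Int) : Finset (Int × Int) :=
  Finset.Icc 0 (ROW - 1) ×ˢ Finset.Icc 0 (COL - 1)

theorem pvStepR_symm (ROW COL : Int) (board : List (List Int)) (t : Int) :
    Symmetric (pvStepR ROW COL board t) := by
  rintro x y ⟨gx, gy, m, hm, he⟩
  refine ⟨gy, gx, ?_⟩
  simp only [pvMoves, List.mem_cons, List.not_mem_nil, or_false] at hm
  rcases hm with h | h | h | h <;> subst h <;> subst he
  · exact ⟨(0, -1), by simp [pvMoves], by simp⟩
  · exact ⟨(-1, 0), by simp [pvMoves], by simp⟩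
  · exact ⟨(0, 1), by simp [pvMoves], by simp⟩
  · exact ⟨(1, 0), by simp [pvMoves], by simp⟩

theorem pvReach_eq_of_mem (ROW COL : Int) (board : List (List Int)) (t : Int)
    (s y : Int × Int) (h : y ∈ pvReach ROW COL board t s) :
    pvReach ROW COL board t y = pvReach ROW COL board t s := by
  have hsymm := Relation.ReflTransGen.symmetric (pvStepR_symm ROW COL board t)
  ext z
  constructor
  · intro hz; exact Relation.ReflTransGen.trans h hz
  · intro hz; exact Relation.ReflTransGen.trans (hsymm h) hz

theorem pvGood_of_mem_reach (ROW COL : Int) (board : List (List Int)) (t : Int)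
    (s x : Int × Int) (hs : pvGood ROW COL board t s)
    (h : x ∈ pvReach ROW COL board t s) : pvGood ROW COL board t x := by
  induction h with
  | refl => exact hs
  | tail _ h2 _ => exact h2.2.1

theorem pvMem_grid_of_good (ROW COL : Int) (board : List (List Int)) (t : Int)
    (x : Int × Int) (h : pvGood ROW COL board t x) : x ∈ pvGrid ROW COL := by
  obtain ⟨h1, h2, h3, h4, _⟩ := h
  simp only [pvGrid, Finset.mem_product, Finset.mem_Icc]
  omega

theorem pvGrid_card (ROW COL : Int) :
    (pvGrid ROW COL).card = ROW.toNat * COL.toNat := by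
  simp only [pvGrid, Finset.card_product, Int.card_Icc]
  congr 1 <;> omega

theorem pvReach_subset_of_closed (ROW COL : Int) (board : List (List Int)) (t : Int)
    (s : Int × Int) (S : Finset (Int × Int)) (hs : s ∈ S)
    (hcl : ∀ x ∈ S, ∀ y, pvStepR ROW COL board t x y → y ∈ S) :
    ∀ x ∈ pvReach ROW COL board t s, x ∈ S := by
  intro x hx
  induction hx with
  | refl => exact hs
  | tail h1 h2 ih => exact hcl _ ih _ h2

-- ---------- A's visited matrix ----------

def pvWF (v : List (List Bool)) (R C : Nat) : Prop :=
  v.length = R ∧ ∀ rw ∈ v, rw.length = C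

theorem pvVGet_empty (R C : Nat) (r c : Int) :
    pvVGet (List.replicate R (List.replicate C false)) r c = false := by
  unfold pvVGet
  cases h : PySem.List.pyGet? (List.replicate R (List.replicate C false)) r with
  | none =>
    simp only [Option.getD_none]
    cases h2 : PySem.List.pyGet? ([] : List Bool) c with
    | none => simp
    | some b => exact absurd (PySem.List.mem_of_pyGet?_eq_some _ h2) (by simp)
  | some rw =>
    have := PySem.List.mem_of_pyGet?_eq_some _ h
    have hrw : rw = List.replicate C false := List.eq_of_mem_replicate this
    subst hrw
    cases h2 : PySem.List.pyGet? (List.replicate C false) c with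
    | none => simp [h2]
    | some b =>
      have := PySem.List.mem_of_pyGet?_eq_some _ h2
      simp [h2, List.eq_of_mem_replicate this]

theorem pvWF_set (v : List (List Bool)) (R C : Nat) (r c : Int) (h : pvWF v R C)
    (hr : 0 ≤ r) (hr2 : r < (R : Int)) : pvWF (pvVSet v r c) R C := by
  obtain ⟨h1, h2⟩ := h
  constructor
  · rw [pvVSet, List.length_set]; exact h1
  · intro rw hrw
    rcases List.mem_or_eq_of_mem_set hrw with h3 | h3
    · exact h2 _ h3
    · subst h3
      rw [List.length_set]
      have hlt : r.toNat < v.length := by omega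
      exact h2 _ (by rw [List.getD_eq_getElem _ _ hlt]; exact List.getElem_mem _)

theorem pvVGet_set (v : List (List Bool)) (R C : Nat) (h : pvWF v R C)
    (r c r' c' : Int) (hr : 0 ≤ r) (hr2 : r < (R : Int)) (hc : 0 ≤ c) (hc2 : c < (C : Int))
    (hr' : 0 ≤ r') (hr2' : r' < (R : Int)) (hc' : 0 ≤ c') (hc2' : c' < (C : Int)) :
    pvVGet (pvVSet v r c) r' c' = if r' = r ∧ c' = c then true else pvVGet v r' c' := by
  obtain ⟨h1, h2⟩ := h
  have hrv : r.toNat < v.length := by omega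
  have hrv' : r'.toNat < v.length := by omega
  have hrow : (v.getD r.toNat []).length = C := by
    rw [List.getD_eq_getElem _ _ hrv]; exact h2 _ (List.getElem_mem _)
  unfold pvVGet pvVSet
  rw [PySem.List.pyGet?_of_nonneg _ hr', PySem.List.pyGet?_of_nonneg _ hr']
  by_cases hre : r' = r
  · subst hre
    rw [List.getElem?_set_self (by omega)]
    simp only [Option.getD_some, true_and]
    rw [PySem.List.pyGet?_of_nonneg _ hc']
    by_cases hce : c' = c
    · subst hce
      rw [List.getElem?_set_self (by omega)]
      simp
    · rw [List.getElem?_set_ne (by omega)]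
      rw [if_neg hce, PySem.List.pyGet?_of_nonneg _ hc']
      rw [List.getElem?_eq_getElem hrv, Option.getD_some, ← List.getD_eq_getElem _ _ hrv]
  · have : r'.toNat ≠ r.toNat := by omega
    rw [List.getElem?_set_ne (by omega)]
    simp only [if_neg (by tauto : ¬(r' = r ∧ c' = c))]

-- ---------- A's BFS computes the component size ----------

theorem pvFinal_card (ROW COL : Int) (board : List (List Int)) (t : Int)
    (s : Int × Int) (S : Finset (Int × Int))
    (hSreach : ∀ x ∈ S, x ∈ pvReach ROW COL board t s)
    (hcl : ∀ x ∈ S, ∀ y, pvStepR ROW COL board t x y → y ∈ S)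
    (hsin : s ∈ S) :
    ((S.card : Int)) = ((pvReach ROW COL board t s).ncard : Int) := by
  have h1 : pvReach ROW COL board t s = (↑S : Set (Int × Int)) := by
    ext x
    exact ⟨fun hx => pvReach_subset_of_closed ROW COL board t s S hsin hcl x hx,
      fun hx => hSreach x hx⟩
  rw [h1, Set.ncard_coe_finset]

theorem pvBFSLoop_eq (ROW COL : Int) (board : List (List Int)) (t : Int)
    (s : Int × Int) (hs : pvGood ROW COL board t s) :
    ∀ (fuel : Nat) (q : List (Int × Int)) (v : List (List Bool))
      (S : Finset (Int × Int)) (cnt : Int),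
      pvWF v ROW.toNat COL.toNat →
      (∀ x, pvGood ROW COL board t x → (pvVGet v x.1 x.2 = true ↔ x ∈ S)) →
      (∀ x ∈ S, pvGood ROW COL board t x) →
      (∀ x ∈ S, x ∈ pvReach ROW COL board t s) →
      (∀ x ∈ q, x ∈ pvReach ROW COL board t s) →
      (∀ x ∈ S, ∀ y, pvStepR ROW COL board t x y → y ∈ S ∨ y ∈ q) →
      (s ∈ S ∨ s ∈ q) →
      cnt = (S.card : Int) →
      q.length + 4 * ((pvGrid ROW COL \ S).card) ≤ fuel →
      pvBFSLoop ROW COL board t fuel q v cnt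
        = ((pvReach ROW COL board t s).ncard : Int) := by
  intro fuel
  induction fuel with
  | zero =>
    intro q v S cnt hwf hiff hgood hSreach hqreach hcl hsin hcnt hfuel
    have hq : q = [] := by
      cases q with
      | nil => rfl
      | cons a l => simp at hfuel
    subst hq
    simp only [List.not_mem_nil] at *
    rw [show pvBFSLoop ROW COL board t 0 [] v cnt = cnt from rfl, hcnt]
    exact pvFinal_card ROW COL board t s S hSreach
      (fun x hx y hy => (hcl x hx y hy).resolve_right (by simp))
      (hsin.resolve_right (by simp))
  | succ fuel ih =>
    intro q v S cnt hwf hiff hgood hSreach hqreach hcl hsin hcnt hfuel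
    match q with
    | [] =>
      rw [show pvBFSLoop ROW COL board t (fuel + 1) [] v cnt = cnt from rfl, hcnt]
      exact pvFinal_card ROW COL board t s S hSreach
        (fun x hx y hy => (hcl x hx y hy).resolve_right (by simp))
        (hsin.resolve_right (by simp))
    | (r, c) :: rest =>
      have hzreach : (r, c) ∈ pvReach ROW COL board t s := hqreach _ (by simp)
      have hzgood : pvGood ROW COL board t (r, c) :=
        pvGood_of_mem_reach ROW COL board t s (r, c) hs hzreach
      obtain ⟨hg1, hg2, hg3, hg4, hg5⟩ := hzgood
      simp only at hg1 hg2 hg3 hg4 hg5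
      have hRnn : (0 : Int) ≤ ROW := by omega
      have hCnn : (0 : Int) ≤ COL := by omega
      have hRcast : ((ROW.toNat : Int)) = ROW := by omega
      have hCcast : ((COL.toNat : Int)) = COL := by omega
      rw [show pvBFSLoop ROW COL board t (fuel + 1) ((r, c) :: rest) v cnt
          = (if pvVGet v r c then pvBFSLoop ROW COL board t fuel rest v cnt
             else pvBFSLoop ROW COL board t fuel
               (rest ++ pvMoves.filterMap (fun m =>
                  let nr := r + m.1
                  let nc := c + m.2
                  if pvInRange nr nc ROW COL && !(pvVGet (pvVSet v r c) nr nc)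
                      && (pvBAt board nr nc == t)
                  then some (nr, nc) else none))
               (pvVSet v r c) (cnt + 1)) from rfl]
      by_cases hv : pvVGet v r c = true
      · rw [if_pos hv]
        have hzS : (r, c) ∈ S := (hiff (r, c) ⟨hg1, hg2, hg3, hg4, hg5⟩).mp hv
        refine ih rest v S cnt hwf hiff hgood hSreach
          (fun x hx => hqreach x (by simp [hx])) ?_ ?_ hcnt (by simp at hfuel; omega)
        · intro x hx y hy
          rcases hcl x hx y hy with h | h
          · exact Or.inl h
          · rcases List.mem_cons.mp h with h | h
            · exact Or.inl (h ▸ hzS)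
            · exact Or.inr h
        · rcases hsin with h | h
          · exact Or.inl h
          · rcases List.mem_cons.mp h with h | h
            · exact Or.inl (h ▸ hzS)
            · exact Or.inr h
      · rw [if_neg hv]
        have hvf : pvVGet v r c = false := by
          cases h : pvVGet v r c
          · rfl
          · exact absurd h hv
        have hznS : (r, c) ∉ S := fun hzS => hv ((hiff (r, c) ⟨hg1, hg2, hg3, hg4, hg5⟩).mpr hzS)
        set nbrs := pvMoves.filterMap (fun m =>
            let nr := r + m.1
            let nc := c + m.2
            if pvInRange nr nc ROW COL && !(pvVGet (pvVSet v r c) nr nc)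
                && (pvBAt board nr nc == t)
            then some (nr, nc) else none) with hnbrs_def
        have hnbr_step : ∀ y ∈ nbrs, pvStepR ROW COL board t (r, c) y := by
          intro y hy
          rw [hnbrs_def] at hy
          obtain ⟨m, hm, hfm⟩ := List.mem_filterMap.mp hy
          simp only at hfm
          split at hfm
          case isTrue hcond =>
            obtain rfl : (r + m.1, c + m.2) = y := Option.some.inj hfm
            simp only [Bool.and_eq_true, beq_iff_eq, Bool.not_eq_true'] at hcond
            obtain ⟨⟨hir, _⟩, hbv⟩ := hcond
            simp only [pvInRange, decide_eq_true_eq] at hir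
            exact ⟨⟨hg1, hg2, hg3, hg4, hg5⟩,
              ⟨by simpa using hir.1, by simpa using hir.2.1,
               by simpa using hir.2.2.1, by simpa using hir.2.2.2, hbv⟩,
              ⟨m, hm, rfl⟩⟩
          case isFalse => cases hfm
        have hnbr_reach : ∀ y ∈ nbrs, y ∈ pvReach ROW COL board t s := by
          intro y hy
          exact Relation.ReflTransGen.tail hzreach (hnbr_step y hy)
        refine ih (rest ++ nbrs) (pvVSet v r c) (insert (r, c) S) (cnt + 1)
          (pvWF_set v ROW.toNat COL.toNat r c hwf hg1 (by omega)) ?_ ?_ ?_ ?_ ?_ ?_ ?_ ?_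
        · -- iff on the new matrix
          intro x hxg
          obtain ⟨hx1, hx2, hx3, hx4, hx5⟩ := hxg
          rw [pvVGet_set v ROW.toNat COL.toNat hwf r c x.1 x.2 hg1 (by omega) hg3 (by omega)
              hx1 (by omega) hx3 (by omega)]
          by_cases hxe : x = (r, c)
          · subst hxe
            simp
          · have : ¬(x.1 = r ∧ x.2 = c) := by
              intro ⟨h1, h2⟩
              exact hxe (Prod.ext h1 h2)
            rw [if_neg this]
            rw [hiff x ⟨hx1, hx2, hx3, hx4, hx5⟩]
            simp [Finset.mem_insert, hxe]
        · intro x hx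
          rcases Finset.mem_insert.mp hx with h | h
          · exact h ▸ ⟨hg1, hg2, hg3, hg4, hg5⟩
          · exact hgood x h
        · intro x hx
          rcases Finset.mem_insert.mp hx with h | h
          · exact h ▸ hzreach
          · exact hSreach x h
        · intro x hx
          rcases List.mem_append.mp hx with h | h
          · exact hqreach x (by simp [h])
          · exact hnbr_reach x h
        · -- closedness
          intro x hx y hy
          rcases Finset.mem_insert.mp hx with h | h
          · subst h
            by_cases hv' : pvVGet (pvVSet v r c) y.1 y.2 = true
            · exact Or.inl ((by
                rw [pvVGet_set v ROW.toNat COL.toNat hwf r c y.1 y.2 hg1 (by omega) hg3 (by omega)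
                    hy.2.1.1 (by have := hy.2.1.2.1; omega) hy.2.1.2.2.1
                    (by have := hy.2.1.2.2.2.1; omega)] at hv'
                split at hv'
                case isTrue hc =>
                  exact Finset.mem_insert.mpr (Or.inl (Prod.ext hc.1 hc.2))
                case isFalse hc =>
                  exact Finset.mem_insert.mpr (Or.inr ((hiff y hy.2.1).mp hv'))) :
                  y ∈ insert (r, c) S)
            · refine Or.inr (List.mem_append.mpr (Or.inr ?_))
              obtain ⟨_, hyg, m, hm, hye⟩ := hy
              subst hye
              rw [hnbrs_def]
              refine List.mem_filterMap.mpr ⟨m, hm, ?_⟩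
              simp only
              obtain ⟨hy1, hy2, hy3, hy4, hy5⟩ := hyg
              rw [if_pos]
              rw [Bool.and_eq_true, Bool.and_eq_true]
              refine ⟨⟨?_, ?_⟩, by simpa using hy5⟩
              · simp only [pvInRange, decide_eq_true_eq]
                exact ⟨hy1, hy2, hy3, hy4⟩
              · simp only [Bool.not_eq_true']
                cases h : pvVGet (pvVSet v r c) (r + m.1) (c + m.2)
                · rfl
                · exact absurd h hv'
          · rcases hcl x h y hy with h2 | h2
            · exact Or.inl (Finset.mem_insert.mpr (Or.inr h2))
            · rcases List.mem_cons.mp h2 with h3 | h3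
              · exact Or.inl (Finset.mem_insert.mpr (Or.inl h3))
              · exact Or.inr (List.mem_append.mpr (Or.inl h3))
        · rcases hsin with h | h
          · exact Or.inl (Finset.mem_insert.mpr (Or.inr h))
          · rcases List.mem_cons.mp h with h2 | h2
            · exact Or.inl (Finset.mem_insert.mpr (Or.inl h2))
            · exact Or.inr (List.mem_append.mpr (Or.inl h2))
        · rw [Finset.card_insert_of_notMem hznS]
          push_cast
          omega
        · have hzgrid : (r, c) ∈ pvGrid ROW COL :=
            pvMem_grid_of_good ROW COL board t (r, c) ⟨hg1, hg2, hg3, hg4, hg5⟩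
          have hzsd : (r, c) ∈ pvGrid ROW COL \ S := Finset.mem_sdiff.mpr ⟨hzgrid, hznS⟩
          rw [Finset.sdiff_insert, Finset.card_erase_of_mem hzsd]
          have hpos : 0 < (pvGrid ROW COL \ S).card := Finset.card_pos.mpr ⟨(r, c), hzsd⟩
          have hnle : nbrs.length ≤ 4 := by
            rw [hnbrs_def]
            exact le_trans (List.length_filterMap_le _ _) (by rfl)
          rw [List.length_append]
          simp only [List.length_cons] at hfuel
          omega

theorem pvBFS_eq (ROW COL : Int) (board : List (List Int)) (r c : Int)
    (hin : pvInRange r c ROW COL = true) :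
    pvBFS ROW COL board r c
      = ((pvReach ROW COL board (pvBAt board r c) (r, c)).ncard : Int) := by
  simp only [pvInRange, decide_eq_true_eq] at hin
  obtain ⟨h1, h2, h3, h4⟩ := hin
  have hgood : pvGood ROW COL board (pvBAt board r c) (r, c) := ⟨h1, h2, h3, h4, rfl⟩
  unfold pvBFS
  refine pvBFSLoop_eq ROW COL board (pvBAt board r c) (r, c) hgood
    (1 + 4 * (ROW.toNat * COL.toNat)) [(r, c)]
    (List.replicate ROW.toNat (List.replicate COL.toNat false)) ∅ 0
    ⟨by simp, by intro rw hrw; simp [List.eq_of_mem_replicate hrw]⟩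
    (fun x _ => by simp [pvVGet_empty]) (by simp) (by simp)
    (fun x hx => by simp at hx; simp [hx, pvReach, Relation.ReflTransGen.refl])
    (by simp) (by simp) (by simp) ?_
  simp [Finset.sdiff_empty, pvGrid_card]

-- ---------- B's flood fill computes the component ----------

theorem pvDFSFold_eq (ROW COL : Int) (board : List (List Int)) (t : Int)
    (x : Int × Int) (hx : pvGood ROW COL board t x) :
    ∀ (ms : List (Int × Int)) (hsub : ∀ m ∈ ms, m ∈ pvMoves)
      (seen : PySem.Set (Int × Int)) (st : List (Int × Int)),
      ∃ Δ : List (Int × Int),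
        (ms.foldl (fun (s : PySem.Set (Int × Int) × List (Int × Int)) m =>
          let nr := x.1 + m.1
          let nc := x.2 + m.2
          if pvInRange nr nc ROW COL && !(PySem.Set.contains s.1 (nr, nc))
              && (pvBAt board nr nc == t)
          then (PySem.Set.add s.1 (nr, nc), s.2 ++ [(nr, nc)])
          else s) (seen, st)) = (seen ++ Δ, st ++ Δ) ∧
        Δ.Nodup ∧
        (∀ y ∈ Δ, pvStepR ROW COL board t x y ∧ y ∉ seen) ∧
        (∀ m ∈ ms, pvStepR ROW COL board t x (x.1 + m.1, x.2 + m.2) →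
          (x.1 + m.1, x.2 + m.2) ∈ seen ++ Δ) := by
  intro ms
  induction ms with
  | nil =>
    intro _ seen st
    exact ⟨[], by simp, by simp, by simp, by simp⟩
  | cons m ms' ih =>
    intro hsub seen st
    have hm : m ∈ pvMoves := hsub m (by simp)
    have hsub' : ∀ m' ∈ ms', m' ∈ pvMoves := fun m' hm' => hsub m' (by simp [hm'])
    simp only [List.foldl_cons]
    by_cases hcond : (pvInRange (x.1 + m.1) (x.2 + m.2) ROW COL
        && !(PySem.Set.contains seen (x.1 + m.1, x.2 + m.2))
        && (pvBAt board (x.1 + m.1) (x.2 + m.2) == t)) = true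
    · have hnm : (x.1 + m.1, x.2 + m.2) ∉ seen := by
        intro hmem
        simp at hcond
        exact hcond.1.2 hmem
      have hstate : (if pvInRange (x.1 + m.1) (x.2 + m.2) ROW COL
            && !(PySem.Set.contains seen (x.1 + m.1, x.2 + m.2))
            && (pvBAt board (x.1 + m.1) (x.2 + m.2) == t)
          then (PySem.Set.add seen (x.1 + m.1, x.2 + m.2), st ++ [(x.1 + m.1, x.2 + m.2)])
          else (seen, st))
          = (seen ++ [(x.1 + m.1, x.2 + m.2)], st ++ [(x.1 + m.1, x.2 + m.2)]) := by
        rw [if_pos hcond, PySem.Set.add_of_not_mem hnm]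
      rw [hstate]
      obtain ⟨Δ', heq, hnd, hprops, hcompl⟩ :=
        ih hsub' (seen ++ [(x.1 + m.1, x.2 + m.2)]) (st ++ [(x.1 + m.1, x.2 + m.2)])
      refine ⟨(x.1 + m.1, x.2 + m.2) :: Δ', ?_, ?_, ?_, ?_⟩
      · rw [heq]; simp
      · refine List.nodup_cons.mpr ⟨?_, hnd⟩
        intro hmem
        have := (hprops _ hmem).2
        simp at this
      · intro y hy
        rcases List.mem_cons.mp hy with h | h
        · subst h
          simp only [Bool.and_eq_true, beq_iff_eq, Bool.not_eq_true'] at hcond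
          obtain ⟨⟨hir, _⟩, hbv⟩ := hcond
          simp only [pvInRange, decide_eq_true_eq] at hir
          exact ⟨⟨hx, ⟨hir.1, hir.2.1, hir.2.2.1, hir.2.2.2, hbv⟩, ⟨m, hm, rfl⟩⟩, hnm⟩
        · obtain ⟨h1, h2⟩ := hprops y h
          refine ⟨h1, fun hmem => h2 (by simp [hmem])⟩
      · intro m' hm' hstep
        rcases List.mem_cons.mp hm' with h | h
        · subst h
          simp
        · have := hcompl m' h hstep
          simpa [List.append_assoc] using this
    · have hstate : (if pvInRange (x.1 + m.1) (x.2 + m.2) ROW COL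
            && !(PySem.Set.contains seen (x.1 + m.1, x.2 + m.2))
            && (pvBAt board (x.1 + m.1) (x.2 + m.2) == t)
          then (PySem.Set.add seen (x.1 + m.1, x.2 + m.2), st ++ [(x.1 + m.1, x.2 + m.2)])
          else (seen, st)) = (seen, st) := by rw [if_neg hcond]
      rw [hstate]
      obtain ⟨Δ, heq, hnd, hprops, hcompl⟩ := ih hsub' seen st
      refine ⟨Δ, heq, hnd, hprops, ?_⟩
      intro m' hm' hstep
      rcases List.mem_cons.mp hm' with h | h
      · subst h
        obtain ⟨_, hyg, _⟩ := hstep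
        obtain ⟨hy1, hy2, hy3, hy4, hy5⟩ := hyg
        have hmem : (x.1 + m'.1, x.2 + m'.2) ∈ seen := by
          by_contra hnmem
          apply hcond
          rw [Bool.and_eq_true, Bool.and_eq_true]
          refine ⟨⟨?_, ?_⟩, by simpa using hy5⟩
          · simp only [pvInRange, decide_eq_true_eq]
            exact ⟨hy1, hy2, hy3, hy4⟩
          · simp only [Bool.not_eq_true']
            rw [← Bool.not_eq_true]
            intro hc
            exact hnmem ((PySem.Set.contains_iff (s := seen)
              (x := (x.1 + m'.1, x.2 + m'.2))).mp hc)
        simp [hmem]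
      · exact hcompl m' h hstep

theorem pvDFSLoop_eq (ROW COL : Int) (board : List (List Int)) (t : Int)
    (s : Int × Int) (hs : pvGood ROW COL board t s) :
    ∀ (fuel : Nat) (st : List (Int × Int)) (seen : PySem.Set (Int × Int))
      (comp : List (Int × Int)),
      seen.Perm (comp ++ st) →
      seen.Nodup →
      (∀ y ∈ seen, y ∈ pvReach ROW COL board t s) →
      (∀ x ∈ comp, ∀ y, pvStepR ROW COL board t x y → y ∈ seen) →
      s ∈ seen →
      st.length + ((pvGrid ROW COL \ seen.toFinset).card) ≤ fuel →
      (pvDFSLoop ROW COL board t fuel st seen comp).Nodup ∧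
        (∀ y, y ∈ pvDFSLoop ROW COL board t fuel st seen comp ↔
          y ∈ pvReach ROW COL board t s) := by
  have final : ∀ (seen : PySem.Set (Int × Int)) (comp : List (Int × Int)),
      seen.Perm comp →
      seen.Nodup →
      (∀ y ∈ seen, y ∈ pvReach ROW COL board t s) →
      (∀ x ∈ comp, ∀ y, pvStepR ROW COL board t x y → y ∈ seen) →
      s ∈ seen →
      comp.Nodup ∧ (∀ y, y ∈ comp ↔ y ∈ pvReach ROW COL board t s) := by
    intro seen comp hperm hnd hreach hcl hsin
    have hmemc : ∀ y, y ∈ comp ↔ y ∈ seen := fun y => (hperm.mem_iff (a := y)).symm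
    refine ⟨hperm.nodup hnd, ?_⟩
    intro y
    constructor
    · intro hy
      exact hreach y ((hmemc y).mp hy)
    · intro hy
      induction hy with
      | refl => exact (hmemc s).mpr hsin
      | tail h1 h2 ihr => exact (hmemc _).mpr (hcl _ ihr _ h2)
  intro fuel
  induction fuel with
  | zero =>
    intro st seen comp hperm hnd hreach hcl hsin hfuel
    have hst : st = [] := by
      cases st with
      | nil => rfl
      | cons a l => simp at hfuel
    subst hst
    rw [show pvDFSLoop ROW COL board t 0 [] seen comp = comp from rfl]
    exact final seen comp (by simpa using hperm) hnd hreach hcl hsin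
  | succ fuel ih =>
    intro st seen comp hperm hnd hreach hcl hsin hfuel
    cases hstc : st with
    | nil =>
      rw [show pvDFSLoop ROW COL board t (fuel + 1) [] seen comp = comp from rfl]
      subst hstc
      exact final seen comp (by simpa using hperm) hnd hreach hcl hsin
    | cons a l =>
      subst hstc
      rcases List.eq_nil_or_concat (a :: l) with habs | ⟨st₀, xl, hdec⟩
      · simp at habs
      · rw [List.concat_eq_append] at hdec
        rw [hdec] at hperm hfuel ⊢
        have hxseen : xl ∈ seen := hperm.mem_iff.mpr (by simp)
        have hxreach : xl ∈ pvReach ROW COL board t s := hreach xl hxseen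
        have hxgood : pvGood ROW COL board t xl :=
          pvGood_of_mem_reach ROW COL board t s xl hs hxreach
        obtain ⟨Δ, heq, hΔnd, hΔprops, hΔcompl⟩ :=
          pvDFSFold_eq ROW COL board t xl hxgood pvMoves (fun m hm => hm) seen st₀
        have hpop : (PySem.List.pyGet? (st₀ ++ [xl]) (-1)).getD (0, 0) = xl := by
          rw [PySem.List.pyGet?_neg_one_append_singleton st₀ xl]; rfl
        have hrest : (st₀ ++ [xl]).take ((st₀ ++ [xl]).length - 1) = st₀ := by
          have : (st₀ ++ [xl]).length - 1 = st₀.length := by simp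
          rw [this, List.take_left]
        rw [show pvDFSLoop ROW COL board t (fuel + 1) (st₀ ++ [xl]) seen comp
            = pvDFSLoop ROW COL board t fuel
              (pvMoves.foldl (fun (s : PySem.Set (Int × Int) × List (Int × Int)) m =>
                let nr := ((PySem.List.pyGet? (st₀ ++ [xl]) (-1)).getD (0, 0)).1 + m.1
                let nc := ((PySem.List.pyGet? (st₀ ++ [xl]) (-1)).getD (0, 0)).2 + m.2
                if pvInRange nr nc ROW COL && !(PySem.Set.contains s.1 (nr, nc))
                    && (pvBAt board nr nc == t)
                then (PySem.Set.add s.1 (nr, nc), s.2 ++ [(nr, nc)])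
                else s) (seen, (st₀ ++ [xl]).take ((st₀ ++ [xl]).length - 1))).2
              (pvMoves.foldl (fun (s : PySem.Set (Int × Int) × List (Int × Int)) m =>
                let nr := ((PySem.List.pyGet? (st₀ ++ [xl]) (-1)).getD (0, 0)).1 + m.1
                let nc := ((PySem.List.pyGet? (st₀ ++ [xl]) (-1)).getD (0, 0)).2 + m.2
                if pvInRange nr nc ROW COL && !(PySem.Set.contains s.1 (nr, nc))
                    && (pvBAt board nr nc == t)
                then (PySem.Set.add s.1 (nr, nc), s.2 ++ [(nr, nc)])
                else s) (seen, (st₀ ++ [xl]).take ((st₀ ++ [xl]).length - 1))).1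
              (comp ++ [(PySem.List.pyGet? (st₀ ++ [xl]) (-1)).getD (0, 0)]) from by
          cases st₀ <;> rfl]
        rw [hpop, hrest, heq]
        have hΔgood : ∀ y ∈ Δ, pvGood ROW COL board t y := by
          intro y hy
          exact ((hΔprops y hy).1).2.1
        have hΔreach : ∀ y ∈ Δ, y ∈ pvReach ROW COL board t s := by
          intro y hy
          exact Relation.ReflTransGen.tail hxreach (hΔprops y hy).1
        have hΔnotseen : ∀ y ∈ Δ, y ∉ seen := fun y hy => (hΔprops y hy).2
        refine ih (st₀ ++ Δ) (seen ++ Δ) (comp ++ [xl]) ?_ ?_ ?_ ?_ (by simp [hsin]) ?_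
        · -- permutation
          have h1 : (seen ++ Δ).Perm ((comp ++ (st₀ ++ [xl])) ++ Δ) := hperm.append_right Δ
          refine h1.trans ?_
          have h2 : (st₀ ++ [xl] ++ Δ).Perm ([xl] ++ (st₀ ++ Δ)) := by
            simpa [List.append_assoc] using
              (List.perm_append_comm (l₁ := st₀) (l₂ := [xl])).append_right Δ
          have h3 : (comp ++ (st₀ ++ [xl])) ++ Δ = comp ++ (st₀ ++ [xl] ++ Δ) := by
            simp [List.append_assoc]
          have h4 : comp ++ ([xl] ++ (st₀ ++ Δ)) = (comp ++ [xl]) ++ (st₀ ++ Δ) := by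
            simp [List.append_assoc]
          rw [h3, ← h4]
          exact List.Perm.append_left comp h2
        · rw [List.nodup_append]
          exact ⟨hnd, hΔnd, fun a ha b hb => fun hab => (hΔnotseen b hb) (hab ▸ ha)⟩
        · intro y hy
          rcases List.mem_append.mp hy with h | h
          · exact hreach y h
          · exact hΔreach y h
        · intro x hx y hy
          rcases List.mem_append.mp hx with h | h
          · exact List.mem_append.mpr (Or.inl (hcl x h y hy))
          · have hxx : x = xl := by simpa using h
            subst hxx
            obtain ⟨hsa, hsb, m, hm, hye⟩ := hy
            subst hye
            exact hΔcompl m hm ⟨hsa, hsb, m, hm, rfl⟩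
        · -- fuel
          have hsub2 : Δ.toFinset ⊆ pvGrid ROW COL \ seen.toFinset := by
            intro z hz
            rw [List.mem_toFinset] at hz
            rw [Finset.mem_sdiff]
            exact ⟨pvMem_grid_of_good ROW COL board t z (hΔgood z hz),
              by rw [List.mem_toFinset]; exact hΔnotseen z hz⟩
          have hdist : pvGrid ROW COL \ (seen ++ Δ).toFinset
              = (pvGrid ROW COL \ seen.toFinset) \ Δ.toFinset := by
            ext z
            simp only [List.toFinset_append, Finset.mem_sdiff, Finset.mem_union]
            tauto
          rw [hdist, Finset.card_sdiff, Finset.inter_eq_left.mpr hsub2, List.toFinset_card_of_nodup hΔnd]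
          have hle : Δ.length ≤ (pvGrid ROW COL \ seen.toFinset).card := by
            calc Δ.length = Δ.toFinset.card := (List.toFinset_card_of_nodup hΔnd).symm
              _ ≤ _ := Finset.card_le_card hsub2
          simp only [List.length_append] at hfuel ⊢
          simp at hfuel
          omega

theorem pvComponent_eq (ROW COL : Int) (board : List (List Int)) (r c : Int)
    (hin : pvInRange r c ROW COL = true) :
    (pvComponent ROW COL board r c).Nodup ∧
      (∀ y, y ∈ pvComponent ROW COL board r c ↔
        y ∈ pvReach ROW COL board (pvBAt board r c) (r, c)) := by
  simp only [pvInRange, decide_eq_true_eq] at hin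
  obtain ⟨h1, h2, h3, h4⟩ := hin
  have hgood : pvGood ROW COL board (pvBAt board r c) (r, c) := ⟨h1, h2, h3, h4, rfl⟩
  unfold pvComponent
  have hzgrid : (r, c) ∈ pvGrid ROW COL :=
    pvMem_grid_of_good ROW COL board _ (r, c) hgood
  refine pvDFSLoop_eq ROW COL board (pvBAt board r c) (r, c) hgood
    (ROW.toNat * COL.toNat) [(r, c)] (PySem.Set.ofList [(r, c)]) []
    (by simp [PySem.Set.ofList]) (by simp [PySem.Set.ofList])
    ?_ (by simp) (by simp [PySem.Set.ofList]) ?_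
  · intro y hy
    simp [PySem.Set.ofList] at hy
    subst hy
    exact Relation.ReflTransGen.refl
  · have : (PySem.Set.ofList [(r, c)]).toFinset = {(r, c)} := by
      simp [PySem.Set.ofList]
    rw [this]
    have hcard : ((pvGrid ROW COL).erase (r, c)).card = (pvGrid ROW COL).card - 1 :=
      Finset.card_erase_of_mem hzgrid
    have hpos : 0 < (pvGrid ROW COL).card := Finset.card_pos.mpr ⟨(r, c), hzgrid⟩
    have hsd : pvGrid ROW COL \ {(r, c)} = (pvGrid ROW COL).erase (r, c) := by
      ext z
      simp [Finset.mem_erase, and_comm]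
    rw [hsd, hcard, pvGrid_card]
    rw [pvGrid_card] at hpos
    simp only [List.length_cons, List.length_nil]
    omega

theorem pvComponent_length (ROW COL : Int) (board : List (List Int)) (r c : Int)
    (hin : pvInRange r c ROW COL = true) :
    ((pvComponent ROW COL board r c).length : Int)
      = ((pvReach ROW COL board (pvBAt board r c) (r, c)).ncard : Int) := by
  obtain ⟨hnd, hmem⟩ := pvComponent_eq ROW COL board r c hin
  have hset : pvReach ROW COL board (pvBAt board r c) (r, c)
      = (↑(pvComponent ROW COL board r c).toFinset : Set (Int × Int)) := by
    ext z
    simp [← hmem z]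
  rw [hset, Set.ncard_coe_finset, List.toFinset_card_of_nodup hnd]

-- ---------- B's precomputed size dict ----------

def pvSizesOK (ROW COL : Int) (board : List (List Int))
    (sizes : PySem.Dict (Int × Int) Int) : Prop :=
  ∀ p ∈ sizes.items,
    p.2 = ((pvReach ROW COL board (pvBAt board p.1.1 p.1.2) p.1).ncard : Int)

theorem pvInsertComp_ok (ROW COL : Int) (board : List (List Int))
    (d : PySem.Dict (Int × Int) Int) (r c : Int)
    (hin : pvInRange r c ROW COL = true) (hok : pvSizesOK ROW COL board d) :
    pvSizesOK ROW COL board (pvInsertComp ROW COL board d r c) := by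
  obtain ⟨hnd, hmem⟩ := pvComponent_eq ROW COL board r c hin
  have hlen := pvComponent_length ROW COL board r c hin
  have hval : ∀ cell ∈ pvComponent ROW COL board r c,
      ((pvComponent ROW COL board r c).length : Int)
        = ((pvReach ROW COL board (pvBAt board cell.1 cell.2) cell).ncard : Int) := by
    intro cell hcell
    have hcr : cell ∈ pvReach ROW COL board (pvBAt board r c) (r, c) :=
      (hmem cell).mp hcell
    have hcgood : pvGood ROW COL board (pvBAt board r c) cell := by
      have hgood : pvGood ROW COL board (pvBAt board r c) (r, c) := by
        simp only [pvInRange, decide_eq_true_eq] at hin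
        exact ⟨hin.1, hin.2.1, hin.2.2.1, hin.2.2.2, rfl⟩
      exact pvGood_of_mem_reach ROW COL board _ (r, c) cell hgood hcr
    have hbcell : pvBAt board cell.1 cell.2 = pvBAt board r c := hcgood.2.2.2.2
    rw [hbcell, pvReach_eq_of_mem ROW COL board (pvBAt board r c) (r, c) cell hcr]
    exact hlen
  unfold pvInsertComp
  have : ∀ (comp : List (Int × Int)) (d : PySem.Dict (Int × Int) Int),
      pvSizesOK ROW COL board d →
      (∀ cell ∈ comp, ((pvComponent ROW COL board r c).length : Int)
        = ((pvReach ROW COL board (pvBAt board cell.1 cell.2) cell).ncard : Int)) →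
      pvSizesOK ROW COL board
        (comp.foldl (fun d cell => PySem.Dict.insert d cell
          ((pvComponent ROW COL board r c).length : Int)) d) := by
    intro comp
    induction comp with
    | nil => intro d hd _; exact hd
    | cons cell comp' ihc =>
      intro d hd hv
      simp only [List.foldl_cons]
      refine ihc _ ?_ (fun z hz => hv z (by simp [hz]))
      intro p hp
      rcases (PySem.Dict.mem_items_insert _ _ _ _).mp hp with h | ⟨h, _⟩
      · subst h
        exact hv cell (by simp)
      · exact hd p h
  exact this _ d hok hval

theorem pvContains_foldl_insert {l : List (Int × Int)} {d : PySem.Dict (Int × Int) Int}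
    {n : Int} {p : Int × Int} (h : p ∈ l ∨ PySem.Dict.contains d p = true) :
    PySem.Dict.contains (l.foldl (fun d cell => PySem.Dict.insert d cell n) d) p = true := by
  induction l generalizing d with
  | nil => simpa using h.resolve_left (by simp)
  | cons a l ih =>
    simp only [List.foldl_cons]
    apply ih
    rcases h with h | h
    · rcases List.mem_cons.mp h with h | h
      · subst h
        exact Or.inr (by simp [PySem.Dict.contains_insert])
      · exact Or.inl h
    · exact Or.inr (by simp [PySem.Dict.contains_insert, h])

-- one cell of B's precompute pass
def pvSizeStep (ROW COL : Int) (board : List (List Int))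
    (d : PySem.Dict (Int × Int) Int) (r c : Int) : PySem.Dict (Int × Int) Int :=
  if PySem.Dict.contains d (r, c) then d else pvInsertComp ROW COL board d r c

theorem pvSizeStep_ok (ROW COL : Int) (board : List (List Int))
    (d : PySem.Dict (Int × Int) Int) (r c : Int)
    (hin : pvInRange r c ROW COL = true) (hok : pvSizesOK ROW COL board d) :
    pvSizesOK ROW COL board (pvSizeStep ROW COL board d r c) := by
  unfold pvSizeStep
  split_ifs with h
  · exact hok
  · exact pvInsertComp_ok ROW COL board d r c hin hok

theorem pvSizeStep_mono (ROW COL : Int) (board : List (List Int))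
    (d : PySem.Dict (Int × Int) Int) (r c : Int) (p : Int × Int)
    (h : PySem.Dict.contains d p = true) :
    PySem.Dict.contains (pvSizeStep ROW COL board d r c) p = true := by
  unfold pvSizeStep
  split_ifs with hc
  · exact h
  · exact pvContains_foldl_insert (Or.inr h)

theorem pvSizeStep_self (ROW COL : Int) (board : List (List Int))
    (d : PySem.Dict (Int × Int) Int) (r c : Int)
    (hin : pvInRange r c ROW COL = true) :
    PySem.Dict.contains (pvSizeStep ROW COL board d r c) (r, c) = true := by
  unfold pvSizeStep
  split_ifs with hc
  · exact hc
  · refine pvContains_foldl_insert (Or.inl ?_)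
    obtain ⟨_, hmem⟩ := pvComponent_eq ROW COL board r c hin
    exact (hmem (r, c)).mpr Relation.ReflTransGen.refl

theorem pvSizes_row (ROW COL : Int) (board : List (List Int)) (r : Int)
    (hr : 0 ≤ r ∧ r < ROW) :
    ∀ (cs : List Int) (d : PySem.Dict (Int × Int) Int),
      (∀ c ∈ cs, 0 ≤ c ∧ c < COL) →
      pvSizesOK ROW COL board d →
      pvSizesOK ROW COL board (cs.foldl (fun d c => pvSizeStep ROW COL board d r c) d) ∧
        ∀ p, (PySem.Dict.contains d p = true ∨ ∃ c ∈ cs, p = (r, c)) →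
          PySem.Dict.contains (cs.foldl (fun d c => pvSizeStep ROW COL board d r c) d) p = true := by
  intro cs
  induction cs with
  | nil =>
    intro d _ hok
    refine ⟨hok, ?_⟩
    intro p hp
    simpa using hp.resolve_right (by simp)
  | cons c cs ih =>
    intro d hcs hok
    have hc : 0 ≤ c ∧ c < COL := hcs c (by simp)
    have hin : pvInRange r c ROW COL = true := by
      simp only [pvInRange, decide_eq_true_eq]; exact ⟨hr.1, hr.2, hc.1, hc.2⟩
    simp only [List.foldl_cons]
    obtain ⟨hok', hcont⟩ := ih (pvSizeStep ROW COL board d r c)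
      (fun c' hc' => hcs c' (by simp [hc']))
      (pvSizeStep_ok ROW COL board d r c hin hok)
    refine ⟨hok', ?_⟩
    intro p hp
    rcases hp with h | ⟨c', hc', he⟩
    · exact hcont p (Or.inl (pvSizeStep_mono ROW COL board d r c p h))
    · rcases List.mem_cons.mp hc' with h | h
      · have hself := hcont (r, c) (Or.inl (pvSizeStep_self ROW COL board d r c hin))
        rw [he, h]
        exact hself
      · exact hcont p (Or.inr ⟨c', h, he⟩)

theorem pvSizes_spec (ROW COL : Int) (board : List (List Int)) :
    pvSizesOK ROW COL board (pvSizes ROW COL board) ∧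
      ∀ r c, pvInRange r c ROW COL = true →
        PySem.Dict.contains (pvSizes ROW COL board) (r, c) = true := by
  unfold pvSizes
  have main : ∀ (rs : List Int) (d : PySem.Dict (Int × Int) Int),
      (∀ r ∈ rs, 0 ≤ r ∧ r < ROW) →
      pvSizesOK ROW COL board d →
      pvSizesOK ROW COL board (rs.foldl (fun d r =>
        (PySem.List.pyRange 0 COL 1).foldl (fun d c => pvSizeStep ROW COL board d r c) d) d) ∧
        ∀ p, (PySem.Dict.contains d p = true ∨
            ∃ r ∈ rs, ∃ c, (0 ≤ c ∧ c < COL) ∧ p = (r, c)) →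
          PySem.Dict.contains (rs.foldl (fun d r =>
            (PySem.List.pyRange 0 COL 1).foldl (fun d c => pvSizeStep ROW COL board d r c) d) d)
            p = true := by
    intro rs
    induction rs with
    | nil =>
      intro d _ hok
      refine ⟨hok, ?_⟩
      intro p hp
      simpa using hp.resolve_right (by simp)
    | cons r rs ih =>
      intro d hrs hok
      have hr : 0 ≤ r ∧ r < ROW := hrs r (by simp)
      have hcsmem : ∀ c ∈ PySem.List.pyRange 0 COL 1, 0 ≤ c ∧ c < COL := by
        intro c hc
        have := (PySem.List.mem_pyRange_one (a := 0) (b := COL) (x := c)).mp hc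
        omega
      simp only [List.foldl_cons]
      obtain ⟨hok1, hcont1⟩ := pvSizes_row ROW COL board r hr
        (PySem.List.pyRange 0 COL 1) d hcsmem hok
      obtain ⟨hok2, hcont2⟩ := ih _ (fun r' hr' => hrs r' (by simp [hr'])) hok1
      refine ⟨hok2, ?_⟩
      intro p hp
      rcases hp with h | ⟨r', hr', c', hc', he⟩
      · exact hcont2 p (Or.inl (hcont1 p (Or.inl h)))
      · rcases List.mem_cons.mp hr' with h | h
        · have hself := hcont2 (r, c') (Or.inl (hcont1 (r, c')
            (Or.inr ⟨c', (PySem.List.mem_pyRange_one).mpr (by omega), rfl⟩)))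
          rw [he, h]
          exact hself
        · exact hcont2 p (Or.inr ⟨r', h, c', hc', he⟩)
  have hrsmem : ∀ r ∈ PySem.List.pyRange 0 ROW 1, 0 ≤ r ∧ r < ROW := by
    intro r hrm
    have := (PySem.List.mem_pyRange_one (a := 0) (b := ROW) (x := r)).mp hrm
    omega
  obtain ⟨hok, hcont⟩ := main (PySem.List.pyRange 0 ROW 1) PySem.Dict.empty hrsmem
    (by intro p hp; simp [PySem.Dict.empty] at hp)
  refine ⟨hok, ?_⟩
  intro r c hin
  simp only [pvInRange, decide_eq_true_eq] at hin
  refine hcont (r, c) (Or.inr ⟨r, ?_, c, ⟨hin.2.2.1, hin.2.2.2⟩, rfl⟩)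
  exact (PySem.List.mem_pyRange_one).mpr (by omega)

theorem pvSizes_getD (ROW COL : Int) (board : List (List Int)) (r c : Int)
    (hin : pvInRange r c ROW COL = true) :
    PySem.Dict.getD (pvSizes ROW COL board) (r, c) 0
      = ((pvReach ROW COL board (pvBAt board r c) (r, c)).ncard : Int) := by
  obtain ⟨hok, hcont⟩ := pvSizes_spec ROW COL board
  have hsome : ((pvSizes ROW COL board).get? (r, c)).isSome = true := by
    rw [← PySem.Dict.contains_eq_isSome_get?]
    exact hcont r c hin
  obtain ⟨v, hv⟩ := Option.isSome_iff_exists.mp hsome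
  have hitem := PySem.Dict.mem_items_of_get?_eq_some (d := pvSizes ROW COL board) hv
  have hval := hok _ hitem
  rw [PySem.Dict.getD_of_get?_eq_some (d := pvSizes ROW COL board) (d0 := 0) hv]
  simpa using hval

-- ---------- index arithmetic and the bounce ----------

theorem pvMod4_shift (a : Int) : PySem.Int.mod (a + 4) 4 = PySem.Int.mod a 4 := by
  rw [PySem.Int.mod_eq_emod_of_pos (by norm_num), PySem.Int.mod_eq_emod_of_pos (by norm_num)]
  omega

theorem pvMod4_bounds (a : Int) : 0 ≤ PySem.Int.mod a 4 ∧ PySem.Int.mod a 4 < 4 := by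
  exact ⟨PySem.Int.mod_nonneg a (by norm_num), PySem.Int.mod_lt a (by norm_num)⟩

theorem pvBounce_in_range (ROW COL row col d1 : Int) (hR : 2 ≤ ROW) (hC : 2 ≤ COL)
    (hd : 0 ≤ d1) (hd2 : d1 < 4) (hin : pvInRange row col ROW COL = true) :
    pvInRange
      (row + ((PySem.List.pyGet? pvMoves
        (if !(pvInRange (row + ((PySem.List.pyGet? pvMoves d1).getD (0, 0)).1)
              (col + ((PySem.List.pyGet? pvMoves d1).getD (0, 0)).2) ROW COL)
         then PySem.Int.mod (d1 + 2) 4 else d1)).getD (0, 0)).1)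
      (col + ((PySem.List.pyGet? pvMoves
        (if !(pvInRange (row + ((PySem.List.pyGet? pvMoves d1).getD (0, 0)).1)
              (col + ((PySem.List.pyGet? pvMoves d1).getD (0, 0)).2) ROW COL)
         then PySem.Int.mod (d1 + 2) 4 else d1)).getD (0, 0)).2) ROW COL = true := by
  have e0 : (PySem.List.pyGet? pvMoves (0 : Int)).getD (0, 0) = ((0 : Int), (1 : Int)) := rfl
  have e1 : (PySem.List.pyGet? pvMoves (1 : Int)).getD (0, 0) = ((1 : Int), (0 : Int)) := rfl
  have e2 : (PySem.List.pyGet? pvMoves (2 : Int)).getD (0, 0) = ((0 : Int), (-1 : Int)) := rfl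
  have e3 : (PySem.List.pyGet? pvMoves (3 : Int)).getD (0, 0) = ((-1 : Int), (0 : Int)) := rfl
  have m02 : PySem.Int.mod ((0 : Int) + 2) 4 = 2 := rfl
  have m12 : PySem.Int.mod ((1 : Int) + 2) 4 = 3 := rfl
  have m22 : PySem.Int.mod ((2 : Int) + 2) 4 = 0 := rfl
  have m32 : PySem.Int.mod ((3 : Int) + 2) 4 = 1 := rfl
  interval_cases d1 <;>
    simp only [e0, e1, e2, e3] <;>
    split_ifs with h <;>
    simp only [m02, m12, m22, m32, e0, e1, e2, e3] <;>
    simp only [pvInRange, decide_eq_true_eq, Bool.not_eq_true', decide_eq_false_iff_not] at h hin ⊢ <;>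
    omega

-- ---------- the main simulation ----------

theorem pvLoop_eq (ROW COL : Int) (board : List (List Int))
    (sizes : PySem.Dict (Int × Int) Int) (hR : 2 ≤ ROW) (hC : 2 ≤ COL)
    (hsz : ∀ r c, pvInRange r c ROW COL = true →
      PySem.Dict.getD sizes (r, c) 0
        = ((pvReach ROW COL board (pvBAt board r c) (r, c)).ncard : Int)) :
    ∀ (k : Nat) (row col idx total : Int) (t b n s e w : Int),
      0 ≤ idx → idx < 4 →
      pvInRange row col ROW COL = true →
      pvInRange (row + ((PySem.List.pyGet? pvMoves idx).getD (0, 0)).1)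
        (col + ((PySem.List.pyGet? pvMoves idx).getD (0, 0)).2) ROW COL = true →
      pvALoop ROW COL board k row col idx [t, s, b, n] [t, e, b, w] total
        = pvBLoop ROW COL board sizes k t b n s e w row col idx total := by
  intro k
  induction k with
  | zero =>
    intro row col idx total t b n s e w _ _ _ _
    rfl
  | succ k ih =>
    intro row col idx total t b n s e w hi1 hi2 h3 h4
    interval_cases idx
    · -- idx = 0
      have eI : (PySem.List.pyGet? pvMoves (0 : Int)).getD (0, 0) = ((0 : Int), (1 : Int)) := rfl
      rw [eI] at h4
      simp only at h4
      have h4' : pvInRange (row + 0) (col + 1) ROW COL = true := h4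
      have hB1 := hsz (row + 0) (col + 1) h4'
      have hA := pvBFS_eq ROW COL board (row + 0) (col + 1) h4'
      have hkey : ((pvMoveType.get? (PySem.Int.toStr 0 ++ PySem.Int.toStr 1)).getD "") = "RIGHT" := rfl
      have hroll : pvRollA "RIGHT" [t, s, b, n] [t, e, b, w] = ([w, s, e, n], [w, t, e, b]) := rfl
      have hbot : (PySem.List.pyGet? [w, s, e, n] (2 : Int)).getD 0 = e := rfl
      simp only [pvALoop, pvBLoop, eI, hkey, hroll, hbot,
        show (((0 : Int) == 0) = true) = True by decide,
        show (((0 : Int) == 2) = true) = False by decide,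
        show (((0 : Int) == 3) = true) = False by decide,
        if_true, if_false]
      rw [hA, hB1]
      have hturn : (PySem.Int.mod ((if e < pvBAt board (row + 0) (col + 1) then (0 : Int) - 1
            else if e > pvBAt board (row + 0) (col + 1) then (0 : Int) + 1 else 0) + 4) 4)
          = (if e < pvBAt board (row + 0) (col + 1) then PySem.Int.mod ((0 : Int) - 1) 4
            else if e > pvBAt board (row + 0) (col + 1) then PySem.Int.mod ((0 : Int) + 1) 4 else 0) := by
        split_ifs <;> rfl
      rw [hturn]
      have hbounce : ∀ x : Int, PySem.Int.mod (x + 2 + 4) 4 = PySem.Int.mod (x + 2) 4 :=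
        fun x => pvMod4_shift (x + 2)
      rw [hbounce]
      set dnew := (if e < pvBAt board (row + 0) (col + 1) then PySem.Int.mod ((0 : Int) - 1) 4
        else if e > pvBAt board (row + 0) (col + 1) then PySem.Int.mod ((0 : Int) + 1) 4 else 0) with hdnew
      have hdb : 0 ≤ dnew ∧ dnew < 4 := by
        rw [hdnew]
        split_ifs
        · exact pvMod4_bounds _
        · exact pvMod4_bounds _
        · norm_num
      set d2 := (if !(pvInRange (row + 0 + ((PySem.List.pyGet? pvMoves dnew).getD (0, 0)).1)
          (col + 1 + ((PySem.List.pyGet? pvMoves dnew).getD (0, 0)).2) ROW COL)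
        then PySem.Int.mod (dnew + 2) 4 else dnew) with hd2
      have hd2b : 0 ≤ d2 ∧ d2 < 4 := by
        rw [hd2]
        split_ifs
        · exact pvMod4_bounds _
        · exact hdb
      have hnext := pvBounce_in_range ROW COL (row + 0) (col + 1) dnew hR hC hdb.1 hdb.2 h4'
      exact ih (row + 0) (col + 1) d2 _ w e n s t b hd2b.1 hd2b.2 h4' hnext
    · -- idx = 1
      have eI : (PySem.List.pyGet? pvMoves (1 : Int)).getD (0, 0) = ((1 : Int), (0 : Int)) := rfl
      rw [eI] at h4
      simp only at h4
      have h4' : pvInRange (row + 1) (col + 0) ROW COL = true := h4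
      have hB1 := hsz (row + 1) (col + 0) h4'
      have hA := pvBFS_eq ROW COL board (row + 1) (col + 0) h4'
      have hkey : ((pvMoveType.get? (PySem.Int.toStr 1 ++ PySem.Int.toStr 0)).getD "") = "BOTTOM" := rfl
      have hroll : pvRollA "BOTTOM" [t, s, b, n] [t, e, b, w] = ([n, t, s, b], [n, e, s, w]) := rfl
      have hbot : (PySem.List.pyGet? [n, t, s, b] (2 : Int)).getD 0 = s := rfl
      simp only [pvALoop, pvBLoop, eI, hkey, hroll, hbot,
        show (((1 : Int) == 0) = true) = False by decide,
        show (((1 : Int) == 2) = true) = False by decide,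
        show (((1 : Int) == 3) = true) = False by decide,
        if_true, if_false]
      rw [hA, hB1]
      have hturn : (PySem.Int.mod ((if s < pvBAt board (row + 1) (col + 0) then (1 : Int) - 1
            else if s > pvBAt board (row + 1) (col + 0) then (1 : Int) + 1 else 1) + 4) 4)
          = (if s < pvBAt board (row + 1) (col + 0) then PySem.Int.mod ((1 : Int) - 1) 4
            else if s > pvBAt board (row + 1) (col + 0) then PySem.Int.mod ((1 : Int) + 1) 4 else 1) := by
        split_ifs <;> rfl
      rw [hturn]
      have hbounce : ∀ x : Int, PySem.Int.mod (x + 2 + 4) 4 = PySem.Int.mod (x + 2) 4 :=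
        fun x => pvMod4_shift (x + 2)
      rw [hbounce]
      set dnew := (if s < pvBAt board (row + 1) (col + 0) then PySem.Int.mod ((1 : Int) - 1) 4
        else if s > pvBAt board (row + 1) (col + 0) then PySem.Int.mod ((1 : Int) + 1) 4 else 1) with hdnew
      have hdb : 0 ≤ dnew ∧ dnew < 4 := by
        rw [hdnew]
        split_ifs
        · exact pvMod4_bounds _
        · exact pvMod4_bounds _
        · norm_num
      set d2 := (if !(pvInRange (row + 1 + ((PySem.List.pyGet? pvMoves dnew).getD (0, 0)).1)
          (col + 0 + ((PySem.List.pyGet? pvMoves dnew).getD (0, 0)).2) ROW COL)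
        then PySem.Int.mod (dnew + 2) 4 else dnew) with hd2
      have hd2b : 0 ≤ d2 ∧ d2 < 4 := by
        rw [hd2]
        split_ifs
        · exact pvMod4_bounds _
        · exact hdb
      have hnext := pvBounce_in_range ROW COL (row + 1) (col + 0) dnew hR hC hdb.1 hdb.2 h4'
      exact ih (row + 1) (col + 0) d2 _ n s b t e w hd2b.1 hd2b.2 h4' hnext
    · -- idx = 2
      have eI : (PySem.List.pyGet? pvMoves (2 : Int)).getD (0, 0) = ((0 : Int), (-1 : Int)) := rfl
      rw [eI] at h4
      simp only at h4
      have h4' : pvInRange (row + 0) (col + -1) ROW COL = true := h4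
      have hB1 := hsz (row + 0) (col + -1) h4'
      have hA := pvBFS_eq ROW COL board (row + 0) (col + -1) h4'
      have hkey : ((pvMoveType.get? (PySem.Int.toStr (0 : Int) ++ PySem.Int.toStr (-1 : Int))).getD "") = "LEFT" := rfl
      have hroll : pvRollA "LEFT" [t, s, b, n] [t, e, b, w] = ([e, s, w, n], [e, b, w, t]) := rfl
      have hbot : (PySem.List.pyGet? [e, s, w, n] (2 : Int)).getD 0 = w := rfl
      simp only [pvALoop, pvBLoop, eI, hkey, hroll, hbot,
        show (((2 : Int) == 0) = true) = False by decide,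
        show (((2 : Int) == 2) = true) = True by decide,
        show (((2 : Int) == 3) = true) = False by decide,
        if_true, if_false]
      rw [hA, hB1]
      have hturn : (PySem.Int.mod ((if w < pvBAt board (row + 0) (col + -1) then (2 : Int) - 1
            else if w > pvBAt board (row + 0) (col + -1) then (2 : Int) + 1 else 2) + 4) 4)
          = (if w < pvBAt board (row + 0) (col + -1) then PySem.Int.mod ((2 : Int) - 1) 4
            else if w > pvBAt board (row + 0) (col + -1) then PySem.Int.mod ((2 : Int) + 1) 4 else 2) := by
        split_ifs <;> rfl
      rw [hturn]
      have hbounce : ∀ x : Int, PySem.Int.mod (x + 2 + 4) 4 = PySem.Int.mod (x + 2) 4 :=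
        fun x => pvMod4_shift (x + 2)
      rw [hbounce]
      set dnew := (if w < pvBAt board (row + 0) (col + -1) then PySem.Int.mod ((2 : Int) - 1) 4
        else if w > pvBAt board (row + 0) (col + -1) then PySem.Int.mod ((2 : Int) + 1) 4 else 2) with hdnew
      have hdb : 0 ≤ dnew ∧ dnew < 4 := by
        rw [hdnew]
        split_ifs
        · exact pvMod4_bounds _
        · exact pvMod4_bounds _
        · norm_num
      set d2 := (if !(pvInRange (row + 0 + ((PySem.List.pyGet? pvMoves dnew).getD (0, 0)).1)
          (col + -1 + ((PySem.List.pyGet? pvMoves dnew).getD (0, 0)).2) ROW COL)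
        then PySem.Int.mod (dnew + 2) 4 else dnew) with hd2
      have hd2b : 0 ≤ d2 ∧ d2 < 4 := by
        rw [hd2]
        split_ifs
        · exact pvMod4_bounds _
        · exact hdb
      have hnext := pvBounce_in_range ROW COL (row + 0) (col + -1) dnew hR hC hdb.1 hdb.2 h4'
      exact ih (row + 0) (col + -1) d2 _ e w n s b t hd2b.1 hd2b.2 h4' hnext
    · -- idx = 3
      have eI : (PySem.List.pyGet? pvMoves (3 : Int)).getD (0, 0) = ((-1 : Int), (0 : Int)) := rfl
      rw [eI] at h4
      simp only at h4
      have h4' : pvInRange (row + -1) (col + 0) ROW COL = true := h4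
      have hB1 := hsz (row + -1) (col + 0) h4'
      have hA := pvBFS_eq ROW COL board (row + -1) (col + 0) h4'
      have hkey : ((pvMoveType.get? (PySem.Int.toStr (-1 : Int) ++ PySem.Int.toStr (0 : Int))).getD "") = "TOP" := rfl
      have hroll : pvRollA "TOP" [t, s, b, n] [t, e, b, w] = ([s, b, n, t], [s, e, n, w]) := rfl
      have hbot : (PySem.List.pyGet? [s, b, n, t] (2 : Int)).getD 0 = n := rfl
      simp only [pvALoop, pvBLoop, eI, hkey, hroll, hbot,
        show (((3 : Int) == 0) = true) = False by decide,
        show (((3 : Int) == 2) = true) = False by decide,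
        show (((3 : Int) == 3) = true) = True by decide,
        if_true, if_false]
      rw [hA, hB1]
      have hturn : (PySem.Int.mod ((if n < pvBAt board (row + -1) (col + 0) then (3 : Int) - 1
            else if n > pvBAt board (row + -1) (col + 0) then (3 : Int) + 1 else 3) + 4) 4)
          = (if n < pvBAt board (row + -1) (col + 0) then PySem.Int.mod ((3 : Int) - 1) 4
            else if n > pvBAt board (row + -1) (col + 0) then PySem.Int.mod ((3 : Int) + 1) 4 else 3) := by
        split_ifs <;> rfl
      rw [hturn]
      have hbounce : ∀ x : Int, PySem.Int.mod (x + 2 + 4) 4 = PySem.Int.mod (x + 2) 4 :=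
        fun x => pvMod4_shift (x + 2)
      rw [hbounce]
      set dnew := (if n < pvBAt board (row + -1) (col + 0) then PySem.Int.mod ((3 : Int) - 1) 4
        else if n > pvBAt board (row + -1) (col + 0) then PySem.Int.mod ((3 : Int) + 1) 4 else 3) with hdnew
      have hdb : 0 ≤ dnew ∧ dnew < 4 := by
        rw [hdnew]
        split_ifs
        · exact pvMod4_bounds _
        · exact pvMod4_bounds _
        · norm_num
      set d2 := (if !(pvInRange (row + -1 + ((PySem.List.pyGet? pvMoves dnew).getD (0, 0)).1)
          (col + 0 + ((PySem.List.pyGet? pvMoves dnew).getD (0, 0)).2) ROW COL)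
        then PySem.Int.mod (dnew + 2) 4 else dnew) with hd2
      have hd2b : 0 ≤ d2 ∧ d2 < 4 := by
        rw [hd2]
        split_ifs
        · exact pvMod4_bounds _
        · exact hdb
      have hnext := pvBounce_in_range ROW COL (row + -1) (col + 0) dnew hR hC hdb.1 hdb.2 h4'
      exact ih (row + -1) (col + 0) d2 _ s n t b e w hd2b.1 hd2b.2 h4' hnext


-- ===== VERDICT (by name: the statement is the Claim_ definition above) =====
theorem solution_spec : Claim_equal_solution := by
  intro ROW COL K board _ hpre
  unfold Spec_solution solution solution_alt
  rcases hpre with ⟨_, hk | ⟨hR, hC⟩⟩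
  · have : K.toNat = 0 := by omega
    rw [this]; rfl
  · exact pvLoop_eq ROW COL board (pvSizes ROW COL board) hR hC
      (fun r c hin => pvSizes_getD ROW COL board r c hin)
      K.toNat 0 0 0 0 1 6 2 5 3 4
      (by norm_num) (by norm_num) (by simp [pvInRange]; omega)
      (by
        rw [show (PySem.List.pyGet? pvMoves (0 : Int)).getD (0, 0) = ((0 : Int), (1 : Int)) from rfl]
        simp only [pvInRange, decide_eq_true_eq]
        omega)
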